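-- pv_equiv track=rewrite | github.com/nickkid/ParaCopasi | utility/sbatch_prepare.py | get_repeat_as_per_process
-- ===== SOURCE A (Python) =====
-- list_process = [8, 16, 32, 64, 128, 256]
--
-- num_repeat_group = 12
--
-- def get_repeat_as_per_process(process):
--     """
--     process: list of int.
--     """
--     list_repeats_per_process = []
--     for i in range(len(process)):
--         list_repeats = [
--             list_process[i] * 2**j for j in range(num_repeat_group)
--         ]
--         list_repeats_per_process.append(list_repeats)
--     return list_repeats_per_process
-- ===== SOURCE B (Python) =====
-- list_process = [8, 16, 32, 64, 128, 256]
--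
-- num_repeat_group = 12
--
-- def get_repeat_as_per_process(process):
--     """
--     process: list of int.
--     """
--     result = []
--     for i in range(len(process)):
--         val = list_process[i]
--         row = []
--         for _ in range(num_repeat_group):
--             row.append(val)
--             val *= 2
--         result.append(row)
--     return result
-- ===== Notes on version B (the rewrite author's own statement) =====
-- stated objective: alternative
-- what changed: The inner closed-form comprehension [base * 2**j for j in range(12)] is replaced by maintaining a running value and repeated doubling (val *= 2) while appending, i.e. the recurrence a_j = 2*a_{j-1} instead of exponentiation.
import Mathlib
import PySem

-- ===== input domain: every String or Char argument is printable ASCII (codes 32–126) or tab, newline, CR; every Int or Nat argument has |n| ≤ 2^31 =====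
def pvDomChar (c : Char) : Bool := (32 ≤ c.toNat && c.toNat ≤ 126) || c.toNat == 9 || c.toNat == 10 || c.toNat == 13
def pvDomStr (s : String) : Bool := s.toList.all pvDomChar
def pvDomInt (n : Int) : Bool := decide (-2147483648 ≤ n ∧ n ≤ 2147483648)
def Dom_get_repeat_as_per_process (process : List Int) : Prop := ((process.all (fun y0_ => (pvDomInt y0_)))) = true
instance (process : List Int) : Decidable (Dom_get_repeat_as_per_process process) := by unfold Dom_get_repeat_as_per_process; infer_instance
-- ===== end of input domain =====

-- B replaces the closed-form 2**j comprehension by repeated doubling with a running value (alternative decomposition, same results).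


-- ===== PORT A =====
def pvListProcess : List Int := [8, 16, 32, 64, 128, 256]

def pvNumRepeatGroup : Int := 12

-- list_process[i] is exact under Pre_ (i < 6, so the default of pyGetD is never taken)
def get_repeat_as_per_process (process : List Int) : List (List Int) :=
  (PySem.List.pyRange 0 process.length 1).foldl
    (fun acc i =>
      acc ++ [(PySem.List.pyRange 0 pvNumRepeatGroup 1).map
                (fun j => PySem.List.pyGetD pvListProcess i 0 * 2 ^ j.toNat)])
    []

-- ===== PORT B =====
def get_repeat_as_per_process_alt (process : List Int) : List (List Int) :=
  (PySem.List.pyRange 0 process.length 1).foldl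
    (fun acc i =>
      let val := PySem.List.pyGetD pvListProcess i 0
      let row := (PySem.List.pyRange 0 pvNumRepeatGroup 1).foldl
                   (fun (p : List Int × Int) _ => (p.1 ++ [p.2], p.2 * 2)) ([], val)
      acc ++ [row.1])
    []

-- ===== PRECONDITION & SPEC =====
-- Pre_ excludes lists longer than 6, where A indexes past the end of the global list_process and raises IndexError.
def Pre_get_repeat_as_per_process (process : List Int) : Prop := process.length ≤ 6
instance (process : List Int) : Decidable (Pre_get_repeat_as_per_process process) := by unfold Pre_get_repeat_as_per_process; infer_instance
def pvWitness_get_repeat_as_per_process : List Int := [3, 1, 4]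

def Spec_get_repeat_as_per_process (process : List Int) (out : List (List Int)) : Prop := out = get_repeat_as_per_process_alt process
instance (process : List Int) (out : List (List Int)) : Decidable (Spec_get_repeat_as_per_process process out) := by unfold Spec_get_repeat_as_per_process; infer_instance

-- ===== CLAIM (what is proved, stated in full; the proofs are below) =====
def Claim_equal_get_repeat_as_per_process : Prop := ∀ (process : List Int), Dom_get_repeat_as_per_process process → Pre_get_repeat_as_per_process process → Spec_get_repeat_as_per_process process (get_repeat_as_per_process process)

-- ===== LEMMAS AND PROOFS =====
-- the inner doubling fold over range(12) produces exactly [v*2^0, …, v*2^11]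
theorem pv_row_eq (v : Int) :
    ((PySem.List.pyRange 0 pvNumRepeatGroup 1).foldl
       (fun (p : List Int × Int) _ => (p.1 ++ [p.2], p.2 * 2)) ([], v)).1
    = (PySem.List.pyRange 0 pvNumRepeatGroup 1).map (fun j => v * 2 ^ j.toNat) := by
  simp [PySem.List.pyRange, pvNumRepeatGroup, List.range_succ]
  ring_nf
  norm_num

-- ===== VERDICT (by name: the statement is the Claim_ definition above) =====
theorem get_repeat_as_per_process_spec : Claim_equal_get_repeat_as_per_process := by
  intro process _ _
  unfold Spec_get_repeat_as_per_process get_repeat_as_per_process get_repeat_as_per_process_alt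
  simp only [pv_row_eq]
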